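-- pv_equiv track=rewrite | github.com/Royeqiu/Frame_Net_Semantic_Parser | semantic_frame/Train_all_model.py | is_label_invaild
-- ===== SOURCE A (Python) =====
-- def is_label_invaild(labels):
--     check_set = set()
--     for label in labels:
--         check_set.add(label)
--     if len(check_set) <=1:
--         return True
--     else:
--         return False
-- ===== SOURCE B (Python) =====
-- def is_label_invaild(labels):
--     if not labels:
--         return True
--     first = labels[0]
--     for label in labels[1:]:
--         if label != first:
--             return False
--     return True
-- ===== Notes on version B (the rewrite author's own statement) =====
-- stated objective: simpler
-- what changed: Replaces building a set of all labels and measuring its size with a single short-circuiting scan that compares every label to the first one.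
import Mathlib
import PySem

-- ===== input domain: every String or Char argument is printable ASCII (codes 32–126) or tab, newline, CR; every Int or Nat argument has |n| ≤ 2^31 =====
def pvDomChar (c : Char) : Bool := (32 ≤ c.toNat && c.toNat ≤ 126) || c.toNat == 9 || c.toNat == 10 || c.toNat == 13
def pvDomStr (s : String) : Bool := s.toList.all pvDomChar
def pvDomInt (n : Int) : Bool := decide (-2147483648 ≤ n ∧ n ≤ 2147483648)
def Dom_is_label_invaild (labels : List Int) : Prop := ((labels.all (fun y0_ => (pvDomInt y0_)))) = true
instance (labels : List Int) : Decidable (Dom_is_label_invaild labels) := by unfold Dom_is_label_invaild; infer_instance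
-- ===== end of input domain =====

-- B replaces the set-of-all-labels size test with a short-circuiting compare-to-first scan (objective: simpler).

-- ===== PORT A =====
def is_label_invaild (labels : List Int) : Bool :=
  let check_set := labels.foldl PySem.Set.add PySem.Set.empty
  if PySem.Set.len check_set ≤ (1 : Int) then true else false

-- ===== PORT B =====
-- loop 'for label in labels[1:]: if label != first: return False'
def is_label_invaild_altLoop (first : Int) : List Int → Bool
  | [] => true
  | label :: rest => if label ≠ first then false else is_label_invaild_altLoop first rest

def is_label_invaild_alt (labels : List Int) : Bool :=
  match labels with
  | [] => true
  | first :: rest => is_label_invaild_altLoop first rest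

-- ===== PRECONDITION & SPEC =====
def Spec_is_label_invaild (labels : List Int) (out : Bool) : Prop := out = is_label_invaild_alt labels
instance (labels : List Int) (out : Bool) : Decidable (Spec_is_label_invaild labels out) := by unfold Spec_is_label_invaild; infer_instance

-- ===== CLAIM (what is proved, stated in full; the proofs are below) =====
def Claim_equal_is_label_invaild : Prop := ∀ (labels : List Int), Dom_is_label_invaild labels → Spec_is_label_invaild labels (is_label_invaild labels)

-- ===== LEMMAS AND PROOFS =====

theorem altLoop_eq_true_iff (first : Int) (l : List Int) :
    is_label_invaild_altLoop first l = true ↔ ∀ x ∈ l, x = first := by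
  induction l with
  | nil => simp [is_label_invaild_altLoop]
  | cons a t ih => by_cases h : a = first <;> simp [is_label_invaild_altLoop, h, ih]

theorem foldl_add_const (first : Int) (l : List Int) (h : ∀ x ∈ l, x = first) :
    l.foldl PySem.Set.add [first] = [first] := by
  induction l with
  | nil => rfl
  | cons a t ih =>
      have ha : a = first := h a (by simp)
      have : PySem.Set.add [first] a = [first] := by
        simp [PySem.Set.add, ha, PySem.Set.contains]
      simp only [List.foldl_cons, this]
      exact ih (fun x hx => h x (by simp [hx]))

theorem short_all_eq (s : List Int) (h : s.length ≤ 1) :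
    ∀ a ∈ s, ∀ b ∈ s, a = b := by
  match s with
  | [] => intro a ha; simp at ha
  | [c] => intro a ha b hb; simp at ha hb; omega
  | x :: y :: t => simp at h

-- ===== VERDICT (by name: the statement is the Claim_ definition above) =====
theorem is_label_invaild_spec : Claim_equal_is_label_invaild := by
  intro labels _
  unfold Spec_is_label_invaild
  match labels with
  | [] => rfl
  | first :: rest =>
    unfold is_label_invaild is_label_invaild_alt
    simp only []
    by_cases hall : ∀ x ∈ rest, x = first
    · have hs : (first :: rest).foldl PySem.Set.add PySem.Set.empty = [first] := by
        have : PySem.Set.add PySem.Set.empty first = [first] := rfl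
        simp only [List.foldl_cons, this]
        exact foldl_add_const first rest hall
      rw [hs]
      simp [PySem.Set.len, (altLoop_eq_true_iff first rest).mpr hall]
    · rw [not_forall] at hall
      simp only [not_forall, exists_prop] at hall
      obtain ⟨x, hx, hxf⟩ := hall
      have hb : is_label_invaild_altLoop first rest = false := by
        rcases Bool.eq_false_or_eq_true (is_label_invaild_altLoop first rest) with h | h
        · exact absurd ((altLoop_eq_true_iff first rest).mp h x hx) hxf
        · exact h
      have hlen : ¬ PySem.Set.len ((first :: rest).foldl PySem.Set.add PySem.Set.empty) ≤ (1 : Int) := by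
        intro hle
        set s := (first :: rest).foldl PySem.Set.add PySem.Set.empty with hsdef
        have hslen : s.length ≤ 1 := by
          have hlen' : PySem.Set.len s = (s.length : Int) := rfl
          rw [hlen'] at hle
          exact_mod_cast hle
        have hxin : x ∈ s := by
          show x ∈ PySem.Set.ofList (first :: rest)
          exact (PySem.Set.mem_ofList _ _).mpr (by simp [hx])
        have hfin : first ∈ s := by
          show first ∈ PySem.Set.ofList (first :: rest)
          exact (PySem.Set.mem_ofList _ _).mpr (by simp)
        exact hxf (short_all_eq s hslen x hxin first hfin)
      rw [if_neg hlen, hb]
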